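-- pv_equiv track=rewrite | github.com/heicrd/acsuite | acsuite/__init__.py | _negative_to_positive
-- ===== SOURCE A (Python) =====
-- from typing import Deque, Dict, List, Optional, Tuple, Union
--
-- _Neg2pos_in = Union[List[Optional[int]], Optional[int]]
--
-- _Neg2pos_out = Union[Tuple[List[int], List[int]], Tuple[int, int]]
--
-- def _negative_to_positive(num_frames: int, a: _Neg2pos_in, b: _Neg2pos_in) -> _Neg2pos_out:
--     """Changes negative/zero index to positive based on num_frames."""
--     single_trim = isinstance(a, (int, type(None))) and isinstance(b, (int, type(None)))
--
--     # --- single trim --------------------------------------------------------------------------------------------------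
--     if single_trim:
--         a, b = (a or 0), (b or 0)
--         if abs(a) > num_frames or abs(b) > num_frames:
--             raise ValueError(f"_negative_to_positive: {max(abs(a), abs(b))} is out of bounds")
--         return a if a >= 0 else num_frames + a, b if b > 0 else num_frames + b
--
--     # --- multiple trims -----------------------------------------------------------------------------------------------
--     if len(a) != len(b):
--         raise ValueError("_negative_to_positive: lists must be same length")
--
--     real_a, real_b = [(i or 0) for i in a], [(i or 0) for i in b]  # convert None to 0
--
--     if not (all(abs(i) <= num_frames for i in real_a) and all(abs(i) <= num_frames for i in real_b)):
--         raise ValueError("_negative_to_positive: one or more trims are out of bounds")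
--
--     if all(i >= 0 for i in real_a) and all(i > 0 for i in real_b):
--         return real_a, real_b
--
--     positive_a = [x if x >= 0 else num_frames + x for x in real_a]
--     positive_b = [y if y > 0 else num_frames + y for y in real_b]
--
--     return positive_a, positive_b
-- ===== SOURCE B (Python) =====
-- def _negative_to_positive(num_frames, a, b):
--     """Changes negative/zero index to positive based on num_frames."""
--     single_trim = isinstance(a, (int, type(None))) and isinstance(b, (int, type(None)))
--
--     if single_trim:
--         a, b = (a or 0), (b or 0)
--         if abs(a) > num_frames or abs(b) > num_frames:
--             raise ValueError(f"_negative_to_positive: {max(abs(a), abs(b))} is out of bounds")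
--         return a if a >= 0 else num_frames + a, b if b > 0 else num_frames + b
--
--     if len(a) != len(b):
--         raise ValueError("_negative_to_positive: lists must be same length")
--
--     positive_a, positive_b = [], []
--     for x, y in zip(a, b):
--         x, y = (x or 0), (y or 0)
--         if abs(x) > num_frames or abs(y) > num_frames:
--             raise ValueError("_negative_to_positive: one or more trims are out of bounds")
--         positive_a.append(x if x >= 0 else num_frames + x)
--         positive_b.append(y if y > 0 else num_frames + y)
--
--     return positive_a, positive_b
-- ===== Notes on version B (the rewrite author's own statement) =====
-- stated objective: simpler
-- what changed: The list branch's four separate comprehensions and two all() scans are fused into a single loop over zip(a, b) that coalesces None, bounds-checks and converts each pair at once, and A's redundant already-positive early return is dropped.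
import Mathlib
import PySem

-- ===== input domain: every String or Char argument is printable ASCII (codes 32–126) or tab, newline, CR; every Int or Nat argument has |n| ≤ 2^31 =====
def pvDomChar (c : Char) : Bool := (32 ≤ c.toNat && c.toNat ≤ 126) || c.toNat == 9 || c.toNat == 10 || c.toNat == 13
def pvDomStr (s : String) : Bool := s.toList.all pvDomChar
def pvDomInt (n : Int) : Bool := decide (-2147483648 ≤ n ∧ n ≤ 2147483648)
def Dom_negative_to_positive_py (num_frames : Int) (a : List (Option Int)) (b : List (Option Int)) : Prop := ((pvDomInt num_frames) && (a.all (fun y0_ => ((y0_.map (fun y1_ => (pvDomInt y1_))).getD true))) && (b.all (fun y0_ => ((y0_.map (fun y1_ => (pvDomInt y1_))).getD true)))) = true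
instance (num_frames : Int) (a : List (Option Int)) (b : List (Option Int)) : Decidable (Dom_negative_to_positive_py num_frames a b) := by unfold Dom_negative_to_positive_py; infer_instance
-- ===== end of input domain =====

-- B fuses the list branch's comprehensions and all() scans into one zip loop and drops A's redundant already-positive early return (objective: simpler).


-- ===== PORT A =====
-- the list (multiple-trims) branch of A, step for step: None-coalescing maps, then the
-- already-positive early return, then the two conversion comprehensions
def negative_to_positive_py (num_frames : Int) (a : List (Option Int)) (b : List (Option Int)) : List Int × List Int :=
  let real_a := a.map (fun i => i.getD 0)
  let real_b := b.map (fun i => i.getD 0)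
  if real_a.all (fun i => decide (0 ≤ i)) && real_b.all (fun i => decide (0 < i)) then
    (real_a, real_b)
  else
    (real_a.map (fun x => if 0 ≤ x then x else num_frames + x),
     real_b.map (fun y => if 0 < y then y else num_frames + y))

-- ===== PORT B =====
-- B's single loop over zip(a, b), building both output lists together
def negative_to_positive_py_altLoop (num_frames : Int) : List (Option Int) → List (Option Int) → List Int × List Int
  | ox :: xs, oy :: ys =>
      let x := ox.getD 0
      let y := oy.getD 0
      let rest := negative_to_positive_py_altLoop num_frames xs ys
      ((if 0 ≤ x then x else num_frames + x) :: rest.1,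
       (if 0 < y then y else num_frames + y) :: rest.2)
  | _, _ => ([], [])

def negative_to_positive_py_alt (num_frames : Int) (a : List (Option Int)) (b : List (Option Int)) : List Int × List Int :=
  negative_to_positive_py_altLoop num_frames a b

-- ===== PRECONDITION & SPEC =====
-- Pre_ excludes exactly the inputs where Python A raises ValueError: unequal lengths, or a
-- coalesced trim whose absolute value exceeds num_frames.
def Pre_negative_to_positive_py (num_frames : Int) (a : List (Option Int)) (b : List (Option Int)) : Prop :=
  a.length = b.length ∧
  (∀ x ∈ a, |x.getD 0| ≤ num_frames) ∧
  (∀ y ∈ b, |y.getD 0| ≤ num_frames)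
instance (num_frames : Int) (a : List (Option Int)) (b : List (Option Int)) : Decidable (Pre_negative_to_positive_py num_frames a b) := by unfold Pre_negative_to_positive_py; infer_instance

def pvWitness_negative_to_positive_py : Int × List (Option Int) × List (Option Int) :=
  (5, [some (-2), none, some 3], [some 4, some (-1), none])

def Spec_negative_to_positive_py (num_frames : Int) (a : List (Option Int)) (b : List (Option Int)) (out : List Int × List Int) : Prop := out = negative_to_positive_py_alt num_frames a b
instance (num_frames : Int) (a : List (Option Int)) (b : List (Option Int)) (out : List Int × List Int) : Decidable (Spec_negative_to_positive_py num_frames a b out) := by unfold Spec_negative_to_positive_py; infer_instance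

-- ===== CLAIM (what is proved, stated in full; the proofs are below) =====
def Claim_equal_negative_to_positive_py : Prop := ∀ (num_frames : Int) (a : List (Option Int)) (b : List (Option Int)), Dom_negative_to_positive_py num_frames a b → Pre_negative_to_positive_py num_frames a b → Spec_negative_to_positive_py num_frames a b (negative_to_positive_py num_frames a b)

-- ===== LEMMAS AND PROOFS =====

-- B's zip loop computes the two conversion maps, for equal-length inputs
theorem altLoop_eq_maps (num_frames : Int) :
    ∀ (a b : List (Option Int)), a.length = b.length →
      negative_to_positive_py_altLoop num_frames a b =
        (a.map (fun ox => (fun x => if 0 ≤ x then x else num_frames + x) (ox.getD 0)),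
         b.map (fun oy => (fun y => if 0 < y then y else num_frames + y) (oy.getD 0)))
  | [], [], _ => rfl
  | ox :: xs, oy :: ys, h => by
      simp only [negative_to_positive_py_altLoop, List.map]
      rw [altLoop_eq_maps num_frames xs ys (by simpa using h)]
  | [], _ :: _, h => by simp at h
  | _ :: _, [], h => by simp at h

-- ===== VERDICT (by name: the statement is the Claim_ definition above) =====
theorem negative_to_positive_py_spec : Claim_equal_negative_to_positive_py := by
  intro num_frames a b _ hpre
  obtain ⟨hlen, _, _⟩ := hpre
  unfold Spec_negative_to_positive_py negative_to_positive_py negative_to_positive_py_alt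
  rw [altLoop_eq_maps num_frames a b hlen]
  simp only [List.map_map]
  split_ifs with h
  · simp only [Bool.and_eq_true, List.all_eq_true, decide_eq_true_eq] at h
    obtain ⟨ha, hb⟩ := h
    congr 1
    · refine List.map_congr_left fun ox hox => ?_
      have := ha _ (List.mem_map_of_mem hox)
      simp_all
    · refine List.map_congr_left fun oy hoy => ?_
      have := hb _ (List.mem_map_of_mem hoy)
      simp_all
  · rfl
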